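-- pv_equiv track=rewrite | github.com/aqemery/advent-of-code | 2015/03.py | part2
-- ===== SOURCE A (Python) =====
-- def move(c, santa):
--     if c == ">":
--         santa[0] += 1
--     elif c == "<":
--         santa[0] -= 1
--     elif c == "^":
--         santa[1] += 1
--     else:
--         santa[1] -= 1
--
-- def part2(data):
--     cur = [0, 0]
--     cur2 = [0, 0]
--     visited = set()
--     visited.add((0, 0))
--     for c in data[::2]:
--         move(c, cur)
--         visited.add(tuple(cur))
--
--     for c in data[1::2]:
--         move(c, cur2)
--         visited.add(tuple(cur2))
--
--     return len(visited)
-- ===== SOURCE B (Python) =====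
-- def part2(data):
--     # One interleaved pass: the two movers are held as (active, other) and
--     # swapped after every step, so the parity bookkeeping disappears.
--     def step(c, p):
--         x, y = p
--         if c == ">":
--             return (x + 1, y)
--         if c == "<":
--             return (x - 1, y)
--         if c == "^":
--             return (x, y + 1)
--         return (x, y - 1)
--
--     active, other = (0, 0), (0, 0)
--     visited = {(0, 0)}
--     for c in data:
--         active = step(c, active)
--         visited.add(active)
--         active, other = other, active
--     return len(visited)
-- ===== Notes on version B (the rewrite author's own statement) =====
-- stated objective: alternative
-- what changed: Replaces A's two separate loops over the slices data[::2]/data[1::2] (each mutating its own 2-element list) by a single pass over data that keeps both movers as immutable pairs (active, other) and swaps them after every step, so no slicing and no parity index is needed.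
import Mathlib
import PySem

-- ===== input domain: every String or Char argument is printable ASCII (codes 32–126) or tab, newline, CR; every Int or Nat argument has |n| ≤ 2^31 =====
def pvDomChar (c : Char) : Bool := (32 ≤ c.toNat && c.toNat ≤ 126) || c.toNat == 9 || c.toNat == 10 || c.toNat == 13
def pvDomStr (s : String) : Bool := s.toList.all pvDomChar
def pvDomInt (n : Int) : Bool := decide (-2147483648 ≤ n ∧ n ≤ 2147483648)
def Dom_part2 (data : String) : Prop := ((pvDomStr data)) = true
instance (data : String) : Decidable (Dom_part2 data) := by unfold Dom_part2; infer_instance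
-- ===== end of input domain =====

-- B replaces A's two loops over data[::2] / data[1::2] by a single interleaved
-- pass swapping the two movers each step (objective: alternative decomposition).

-- ===== PORT A =====
-- A's helper `move` mutates a 2-element list; ported as a pair-returning function.
def moveP (c : Char) (santa : Int × Int) : Int × Int :=
  if c = '>' then (santa.1 + 1, santa.2)
  else if c = '<' then (santa.1 - 1, santa.2)
  else if c = '^' then (santa.1, santa.2 + 1)
  else (santa.1, santa.2 - 1)

def part2 (data : String) : Int :=
  let cur : Int × Int := (0, 0)
  let cur2 : Int × Int := (0, 0)
  let visited : PySem.Set (Int × Int) := PySem.Set.add PySem.Set.empty (0, 0)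
  -- data[::2] / data[1::2]; step 2 ≠ 0 so slice? always returns some (getD is a totality guard)
  let evens := (PySem.List.slice? data.toList none none 2).getD []
  let odds := (PySem.List.slice? data.toList (some 1) none 2).getD []
  let st1 := evens.foldl
    (fun (s : (Int × Int) × PySem.Set (Int × Int)) c =>
      let p := moveP c s.1; (p, s.2.add p)) (cur, visited)
  let st2 := odds.foldl
    (fun (s : (Int × Int) × PySem.Set (Int × Int)) c =>
      let p := moveP c s.1; (p, s.2.add p)) (cur2, st1.2)
  PySem.Set.len st2.2

-- ===== PORT B =====
def stepB (c : Char) (p : Int × Int) : Int × Int :=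
  let (x, y) := p
  if c = '>' then (x + 1, y)
  else if c = '<' then (x - 1, y)
  else if c = '^' then (x, y + 1)
  else (x, y - 1)

def part2_alt (data : String) : Int :=
  let st := data.toList.foldl
    (fun (s : (Int × Int) × (Int × Int) × PySem.Set (Int × Int)) c =>
      let a := stepB c s.1
      (s.2.1, a, PySem.Set.add s.2.2 a))
    ((0, 0), (0, 0), PySem.Set.add PySem.Set.empty (0, 0))
  PySem.Set.len st.2.2

-- ===== PRECONDITION & SPEC =====
def Spec_part2 (data : String) (out : Int) : Prop := out = part2_alt data
instance (data : String) (out : Int) : Decidable (Spec_part2 data out) := by unfold Spec_part2; infer_instance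

-- ===== CLAIM (what is proved, stated in full; the proofs are below) =====
def Claim_equal_part2 : Prop := ∀ (data : String), Dom_part2 data → Spec_part2 data (part2 data)

-- ===== LEMMAS AND PROOFS =====

-- the characters at even / odd indices
def evL {α : Type} : List α → List α
  | [] => []
  | [a] => [a]
  | a :: _ :: t => a :: evL t

def odL {α : Type} (xs : List α) : List α := evL xs.tail

theorem evL_cons {α : Type} (c : α) (t : List α) : evL (c :: t) = c :: odL t := by
  cases t <;> simp [evL, odL]

theorem odL_cons {α : Type} (c : α) (t : List α) : odL (c :: t) = evL t := rfl

theorem evIdx {α : Type} (xs : List α) :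
    (List.range ((xs.length + 1) / 2)).filterMap (fun k => xs[2 * k]?) = evL xs := by
  induction xs using evL.induct with
  | case1 => simp [evL]
  | case2 a => simp [evL, List.range_succ]
  | case3 a b t ih =>
    have hlen : ((a :: b :: t).length + 1) / 2 = (t.length + 1) / 2 + 1 := by
      simp [List.length_cons]; omega
    rw [hlen, List.range_succ_eq_map]
    simp only [List.filterMap_cons, List.filterMap_map]
    simp only [evL, Function.comp]
    have hidx : ∀ k, (a :: b :: t)[2 * (k + 1)]? = t[2 * k]? := by
      intro k
      have h2 : 2 * (k + 1) = 2 * k + 1 + 1 := by omega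
      simp [h2]
    simp only [hidx, ih]
    simp

theorem slice?_step2 {α : Type} (xs : List α) :
    PySem.List.slice? xs none none 2 = some (evL xs) := by
  rw [← evIdx]
  simp only [PySem.List.slice?, PySem.List.sliceIndices]
  norm_num
  have hc : (if 0 < xs.length then (((xs.length : Int) + 2 - 1) / 2).toNat else 0)
      = (xs.length + 1) / 2 := by split_ifs <;> omega
  rw [hc]
  apply List.filterMap_congr
  intro k _
  have h1 : ((2 * (k : Int)).toNat) = 2 * k := by omega
  rw [h1]

theorem slice?_step2_from1 {α : Type} (xs : List α) :
    PySem.List.slice? xs (some 1) none 2 = some (odL xs) := by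
  cases xs with
  | nil => simp [PySem.List.slice?, PySem.List.sliceIndices, odL, evL]
  | cons a t =>
    rw [odL_cons, ← evIdx]
    simp only [PySem.List.slice?, PySem.List.sliceIndices]
    norm_num
    have hc : (if 0 < t.length then (((t.length : Int) + 2 - 1) / 2).toNat else 0)
        = (t.length + 1) / 2 := by split_ifs <;> omega
    rw [hc]
    apply List.filterMap_congr
    intro k _
    have h1 : ((1 + 2 * (k : Int)).toNat) = 2 * k + 1 := by omega
    rw [h1]
    simp

-- the positions visited along a path
def pathP (p : Int × Int) : List Char → List (Int × Int)
  | [] => []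
  | c :: t => let p' := moveP c p; p' :: pathP p' t

theorem stepB_eq : @stepB = @moveP := by
  funext c p
  cases p
  rfl

theorem foldA_snd (ms : List Char) (p : Int × Int) (v : PySem.Set (Int × Int)) (x : Int × Int) :
    x ∈ (ms.foldl (fun (s : (Int × Int) × PySem.Set (Int × Int)) c =>
        let p := moveP c s.1; (p, s.2.add p)) (p, v)).2 ↔ x ∈ v ∨ x ∈ pathP p ms := by
  induction ms generalizing p v with
  | nil => simp [pathP]
  | cons c t ih =>
    simp only [List.foldl_cons, pathP, ih, PySem.Set.mem_add, List.mem_cons]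
    tauto

theorem foldA_nodup (ms : List Char) (p : Int × Int) (v : PySem.Set (Int × Int)) (hv : v.Nodup) :
    (ms.foldl (fun (s : (Int × Int) × PySem.Set (Int × Int)) c =>
        let p := moveP c s.1; (p, s.2.add p)) (p, v)).2.Nodup := by
  induction ms generalizing p v with
  | nil => exact hv
  | cons c t ih => exact ih _ _ (PySem.Set.nodup_add _ _ hv)

theorem foldB_snd (l : List Char) (a b : Int × Int) (v : PySem.Set (Int × Int)) (x : Int × Int) :
    x ∈ (l.foldl (fun (s : (Int × Int) × (Int × Int) × PySem.Set (Int × Int)) c =>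
        let a := moveP c s.1
        (s.2.1, a, PySem.Set.add s.2.2 a)) (a, b, v)).2.2 ↔
      x ∈ v ∨ x ∈ pathP a (evL l) ∨ x ∈ pathP b (odL l) := by
  induction l generalizing a b v with
  | nil => simp [evL, odL, pathP]
  | cons c t ih =>
    simp only [List.foldl_cons, ih, PySem.Set.mem_add, evL_cons, odL_cons, pathP, List.mem_cons]
    tauto

theorem foldB_nodup (l : List Char) (a b : Int × Int) (v : PySem.Set (Int × Int)) (hv : v.Nodup) :
    (l.foldl (fun (s : (Int × Int) × (Int × Int) × PySem.Set (Int × Int)) c =>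
        let a := moveP c s.1
        (s.2.1, a, PySem.Set.add s.2.2 a)) (a, b, v)).2.2.Nodup := by
  induction l generalizing a b v with
  | nil => exact hv
  | cons c t ih => exact ih _ _ _ (PySem.Set.nodup_add _ _ hv)

-- ===== VERDICT (by name: the statement is the Claim_ definition above) =====
theorem part2_spec : Claim_equal_part2 := by
  intro data _
  unfold Spec_part2 part2 part2_alt
  simp only [stepB_eq, slice?_step2, slice?_step2_from1, Option.getD_some]
  set l := data.toList with hl
  have hv0 : (PySem.Set.add (PySem.Set.empty) ((0 : Int), (0 : Int))).Nodup := by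
    exact PySem.Set.nodup_add _ _ (by simp [PySem.Set.empty])
  set v0 := PySem.Set.add (PySem.Set.empty) ((0 : Int), (0 : Int)) with hv0def
  have hAn := foldA_nodup (odL l) (0, 0) _
    (foldA_nodup (evL l) (0, 0) v0 hv0)
  have hBn := foldB_nodup l (0, 0) (0, 0) v0 hv0
  have hperm := (List.perm_ext_iff_of_nodup hAn hBn).2 (by
    intro x
    rw [foldA_snd, foldA_snd, foldB_snd]
    tauto)
  simp only [PySem.Set.len, hperm.length_eq]
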